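-- pv_equiv track=rewrite | github.com/petergit1/V-SEAM | code/Visual-SemanticEdit/prompt_builder.py | _pick_last_field_as_prompt
-- ===== SOURCE A (Python) =====
-- def _pick_last_field_as_prompt(text: str):
--     """
--     Return the last segment of `text` after splitting by common delimiters.
--     Supported delimiters: '|', ';', ','.
--     If none of them appear, return the stripped text.
--     """
--     if not isinstance(text, str):
--         return None
--     for sep in ["|", ";", ","]:
--         if sep in text:
--             text = text.split(sep)[-1].strip()
--     text = text.strip()
--     return text if text else None
-- ===== SOURCE B (Python) =====
-- def _pick_last_field_as_prompt(text: str):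
--     """
--     Return the last segment of `text` after splitting by common delimiters.
--     Supported delimiters: '|', ';', ','.
--     If none of them appear, return the stripped text.
--     """
--     if not isinstance(text, str):
--         return None
--     i = len(text)
--     while i > 0 and text[i - 1] not in "|;,":
--         i -= 1
--     result = text[i:].strip()
--     return result if result else None
-- ===== Notes on version B (the rewrite author's own statement) =====
-- stated objective: simpler
-- what changed: Replaces the loop over three delimiters with guarded list-materializing splits and repeated strips by a single backwards character scan that finds the last delimiter of any kind, then one slice and one strip.
import Mathlib
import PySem

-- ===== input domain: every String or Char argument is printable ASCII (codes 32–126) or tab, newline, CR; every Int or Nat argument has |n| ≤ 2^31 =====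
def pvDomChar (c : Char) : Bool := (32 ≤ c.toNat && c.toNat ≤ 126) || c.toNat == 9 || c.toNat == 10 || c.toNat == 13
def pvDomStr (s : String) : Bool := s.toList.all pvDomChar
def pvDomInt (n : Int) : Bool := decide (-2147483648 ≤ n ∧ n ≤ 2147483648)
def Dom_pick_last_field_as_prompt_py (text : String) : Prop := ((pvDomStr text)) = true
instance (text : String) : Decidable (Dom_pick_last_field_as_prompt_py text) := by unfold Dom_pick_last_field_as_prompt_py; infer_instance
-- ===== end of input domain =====

-- B replaces A's loop of guarded list-materializing splits and repeated strips by a single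
-- backwards character scan for the last delimiter, then one slice and one strip (objective: simpler).

-- ===== PORT A =====
-- A's loop `for sep in ["|",";",","]: if sep in text: text = text.split(sep)[-1].strip()`,
-- then `text = text.strip(); return text if text else None`.  (The `isinstance` guard is vacuous
-- under the type convention: the argument is a str.)
def pick_last_field_as_prompt_py (text : String) : Option String :=
  let t := ["|", ";", ","].foldl
    (fun t sep =>
      if PySem.Str.isIn sep t
      then PySem.Str.strip (((PySem.Str.split? t sep).getD []).getLastD "")
      else t) text
  let t := PySem.Str.strip t
  if t = "" then none else some t

-- ===== PORT B =====
-- B's `while i > 0 and text[i-1] not in "|;,": i -= 1`: walk the string from the end,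
-- collecting characters until a delimiter is met; `text[i:]` is the reverse of what was collected.
def pvScanB : List Char → List Char
  | [] => []
  | c :: r => if c == '|' || c == ';' || c == ',' then [] else c :: pvScanB r

def pick_last_field_as_prompt_py_alt (text : String) : Option String :=
  let tail := String.ofList (pvScanB text.toList.reverse).reverse
  let result := PySem.Str.strip tail
  if result = "" then none else some result

-- ===== PRECONDITION & SPEC =====
def Spec_pick_last_field_as_prompt_py (text : String) (out : Option String) : Prop := out = pick_last_field_as_prompt_py_alt text
instance (text : String) (out : Option String) : Decidable (Spec_pick_last_field_as_prompt_py text out) := by unfold Spec_pick_last_field_as_prompt_py; infer_instance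

-- ===== CLAIM (what is proved, stated in full; the proofs are below) =====
def Claim_equal_pick_last_field_as_prompt_py : Prop := ∀ (text : String), Dom_pick_last_field_as_prompt_py text → Spec_pick_last_field_as_prompt_py text (pick_last_field_as_prompt_py text)

-- ===== LEMMAS AND PROOFS =====

-- `pvT p l` = the suffix of `l` after the last character satisfying `p` (l itself if none).
def pvT (p : Char → Bool) (l : List Char) : List Char :=
  ((l.reverse.takeWhile (fun c => !p c))).reverse

theorem pvTakeWhile_takeWhile (p q : Char → Bool) (l : List Char) :
    (l.takeWhile q).takeWhile p = l.takeWhile (fun a => p a && q a) := by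
  induction l with
  | nil => simp
  | cons a l ih =>
    cases hq : q a <;> cases hp : p a <;>
      simp [hq, hp, ih]

theorem pvT_compose (p q : Char → Bool) (l : List Char) :
    pvT p (pvT q l) = pvT (fun c => p c || q c) l := by
  simp [pvT, pvTakeWhile_takeWhile]

theorem pvT_of_not_any (p : Char → Bool) (l : List Char) (h : l.any p = false) :
    pvT p l = l := by
  have : l.reverse.takeWhile (fun c => !p c) = l.reverse := by
    refine List.takeWhile_eq_self_iff.mpr ?_
    intro x hx
    simp only [List.mem_reverse] at hx
    simp [List.any_eq_false.mp h x hx]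
  simp [pvT, this]

theorem pvT_cons (p : Char → Bool) (x : Char) (xs : List Char) :
    pvT p (x :: xs) = if xs.any p then pvT p xs else if p x then xs else x :: xs := by
  by_cases h : xs.any p = true
  · have hne : (xs.reverse.takeWhile (fun c => !p c)).length ≠ xs.reverse.length := by
      intro hlen
      have heq : xs.reverse.takeWhile (fun c => !p c) = xs.reverse :=
        (List.takeWhile_prefix _).eq_of_length hlen
      obtain ⟨y, hy, hpy⟩ := List.any_eq_true.mp h
      have := List.takeWhile_eq_self_iff.mp heq y (by simpa using hy)
      simp [hpy] at this
    simp only [pvT, List.reverse_cons, List.takeWhile_append, if_neg hne, h, if_pos]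
  · have h' : xs.any p = false := by simpa using h
    have heq : xs.reverse.takeWhile (fun c => !p c) = xs.reverse := by
      refine List.takeWhile_eq_self_iff.mpr ?_
      intro y hy
      simp only [List.mem_reverse] at hy
      simp [List.any_eq_false.mp h' y hy]
    simp only [pvT, List.reverse_cons, List.takeWhile_append, heq]
    cases hx : p x <;> simp [h', hx]

theorem pvT_last (p : Char → Bool) (a b : List Char) (d : Char)
    (hb : b.any p = false) (hd : p d = true) : pvT p (a ++ d :: b) = b := by
  have hbt : b.reverse.takeWhile (fun c => !p c) = b.reverse := by
    refine List.takeWhile_eq_self_iff.mpr ?_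
    intro y hy
    simp only [List.mem_reverse] at hy
    simp [List.any_eq_false.mp hb y hy]
  have hrev : (a ++ d :: b).reverse = b.reverse ++ d :: a.reverse := by simp
  simp [pvT, hrev, List.takeWhile_append, hbt, hd]

theorem pvExists_last (p : Char → Bool) (l : List Char) (h : l.any p = true) :
    ∃ a d b, l = a ++ d :: b ∧ p d = true ∧ b.any p = false := by
  induction l with
  | nil => simp at h
  | cons x xs ih =>
    by_cases hxs : xs.any p = true
    · obtain ⟨a, d, b, hl, hd, hb⟩ := ih hxs
      exact ⟨x :: a, d, b, by simp [hl], hd, hb⟩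
    · have hx : p x = true := by
        simp only [List.any_cons, Bool.or_eq_true] at h
        tauto
      exact ⟨[], x, xs, rfl, hx, by simpa using hxs⟩

theorem pvBool_false {b : Bool} (h : ¬ b = true) : b = false := by
  cases b
  · rfl
  · exact absurd rfl h

-- strip toolbox
theorem pvDropWhile_idem (p : Char → Bool) (l : List Char) :
    (l.dropWhile p).dropWhile p = l.dropWhile p := by
  induction l with
  | nil => simp
  | cons a l ih =>
    cases ha : p a <;> simp [ha, ih]

theorem pvRstrip_idem (l : List Char) :
    PySem.Chars.rstrip (PySem.Chars.rstrip l) = PySem.Chars.rstrip l := by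
  simp [PySem.Chars.rstrip, pvDropWhile_idem]

theorem pvLstrip_rstrip_lstrip (u : List Char) :
    PySem.Chars.lstrip (PySem.Chars.rstrip (PySem.Chars.lstrip u)) =
      PySem.Chars.rstrip (PySem.Chars.lstrip u) := by
  rcases hz : PySem.Chars.lstrip u with _ | ⟨c, z'⟩
  · simp [PySem.Chars.rstrip, PySem.Chars.lstrip]
  · have hc : PySem.Chars.isspace c = false := by
      have := List.head?_dropWhile_not PySem.Chars.isspace u
      simp only [PySem.Chars.lstrip] at hz
      rw [hz] at this
      simpa using this
    simp only [PySem.Chars.rstrip, List.reverse_cons, List.dropWhile_append]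
    by_cases he : (z'.reverse.dropWhile PySem.Chars.isspace).isEmpty = true
    · simp [he, hc, PySem.Chars.lstrip]
    · simp [he, PySem.Chars.lstrip, hc]

theorem pvStrip_idem (u : List Char) :
    PySem.Chars.strip (PySem.Chars.strip u) = PySem.Chars.strip u := by
  simp only [PySem.Chars.strip]
  rw [pvLstrip_rstrip_lstrip, pvRstrip_idem]

theorem pvMem_lstrip (x : Char) (u : List Char) (h : x ∈ PySem.Chars.lstrip u) : x ∈ u :=
  (List.dropWhile_sublist _).mem h

theorem pvMem_rstrip (x : Char) (u : List Char) (h : x ∈ PySem.Chars.rstrip u) : x ∈ u := by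
  simp only [PySem.Chars.rstrip, List.mem_reverse] at h
  have := (List.dropWhile_sublist (l := u.reverse) PySem.Chars.isspace).mem h
  simpa using this

theorem pvMem_strip (x : Char) (u : List Char) (h : x ∈ PySem.Chars.strip u) : x ∈ u := by
  simp only [PySem.Chars.strip] at h
  exact pvMem_lstrip x u (pvMem_rstrip x _ h)

theorem pvRstrip_any_false (p : Char → Bool) (b : List Char) (hb : b.any p = false) :
    (PySem.Chars.rstrip b).any p = false := by
  refine List.any_eq_false.mpr fun x hx => ?_
  exact List.any_eq_false.mp hb x (pvMem_rstrip x b hx)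

theorem pvStrip_any_false (p : Char → Bool) (u : List Char) (hu : u.any p = false) :
    (PySem.Chars.strip u).any p = false := by
  refine List.any_eq_false.mpr fun x hx => ?_
  exact List.any_eq_false.mp hu x (pvMem_strip x u hx)

theorem pvRstrip_append_cons (x b : List Char) (d : Char)
    (hd : PySem.Chars.isspace d = false) :
    PySem.Chars.rstrip (x ++ d :: b) = x ++ d :: PySem.Chars.rstrip b := by
  simp only [PySem.Chars.rstrip, List.reverse_append, List.reverse_cons]
  rw [List.append_assoc]
  rw [List.dropWhile_append]
  by_cases he : (b.reverse.dropWhile PySem.Chars.isspace).isEmpty = true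
  · have hnil : b.reverse.dropWhile PySem.Chars.isspace = [] := by
      simpa [List.isEmpty_iff] using he
    simp [hd, hnil]
  · have hnil : b.reverse.dropWhile PySem.Chars.isspace ≠ [] := by
      simpa [List.isEmpty_iff] using he
    simp [he]

theorem pvStrip_decomp (a b : List Char) (d : Char)
    (hd : PySem.Chars.isspace d = false) :
    PySem.Chars.strip (a ++ d :: b) =
      a.dropWhile PySem.Chars.isspace ++ d :: PySem.Chars.rstrip b := by
  have hl : PySem.Chars.lstrip (a ++ d :: b) = a.dropWhile PySem.Chars.isspace ++ d :: b := by
    simp only [PySem.Chars.lstrip, List.dropWhile_append]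
    by_cases he : (a.dropWhile PySem.Chars.isspace).isEmpty = true
    · have hnil : a.dropWhile PySem.Chars.isspace = [] := by
        simpa [List.isEmpty_iff] using he
      simp [hd, hnil]
    · simp [he]
  simp only [PySem.Chars.strip, hl]
  exact pvRstrip_append_cons _ _ _ hd

theorem pvRstrip_split (b : List Char) :
    ∃ ws, b = PySem.Chars.rstrip b ++ ws ∧ ws.all PySem.Chars.isspace = true := by
  refine ⟨(b.reverse.takeWhile PySem.Chars.isspace).reverse, ?_, ?_⟩
  · simp only [PySem.Chars.rstrip]
    rw [← List.reverse_append, List.takeWhile_append_dropWhile, List.reverse_reverse]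
  · refine List.all_eq_true.mpr fun x hx => ?_
    simp only [List.mem_reverse] at hx
    exact List.mem_takeWhile_imp hx

theorem pvRstrip_append_all_sp (x ws : List Char) (hws : ws.all PySem.Chars.isspace = true) :
    PySem.Chars.rstrip (x ++ ws) = PySem.Chars.rstrip x := by
  simp only [PySem.Chars.rstrip, List.reverse_append, List.dropWhile_append]
  have hnil : ws.reverse.dropWhile PySem.Chars.isspace = [] := by
    refine List.dropWhile_eq_nil_iff.mpr fun x hx => ?_
    simp only [List.mem_reverse] at hx
    exact List.all_eq_true.mp hws x hx
  simp [hnil]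

theorem pvStrip_append_all_sp (x ws : List Char) (hws : ws.all PySem.Chars.isspace = true) :
    PySem.Chars.strip (x ++ ws) = PySem.Chars.strip x := by
  simp only [PySem.Chars.strip, PySem.Chars.lstrip, List.dropWhile_append]
  by_cases he : (x.dropWhile PySem.Chars.isspace).isEmpty = true
  · have hnil : x.dropWhile PySem.Chars.isspace = [] := by
      simpa [List.isEmpty_iff] using he
    have hnil2 : ws.dropWhile PySem.Chars.isspace = [] := by
      refine List.dropWhile_eq_nil_iff.mpr fun y hy => List.all_eq_true.mp hws y hy
    simp [hnil, hnil2, PySem.Chars.rstrip]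
  · simp only [he]
    simp only [Bool.false_eq_true, if_false]
    exact pvRstrip_append_all_sp _ _ hws

theorem pvStrip_rstrip (b : List Char) :
    PySem.Chars.strip (PySem.Chars.rstrip b) = PySem.Chars.strip b := by
  obtain ⟨ws, hb, hws⟩ := pvRstrip_split b
  conv_rhs => rw [hb]
  rw [pvStrip_append_all_sp _ _ hws]

-- ST: stripping first does not change the stripped tail-after-last-delimiter
theorem pvST (p : Char → Bool) (hp : ∀ c, p c = true → PySem.Chars.isspace c = false)
    (u : List Char) :
    PySem.Chars.strip (pvT p (PySem.Chars.strip u)) = PySem.Chars.strip (pvT p u) := by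
  by_cases hu : u.any p = true
  · obtain ⟨a, d, b, rfl, hd, hb⟩ := pvExists_last p u hu
    have hdns : PySem.Chars.isspace d = false := hp d hd
    rw [pvT_last p a b d hb hd, pvStrip_decomp a b d hdns,
      pvT_last p _ _ d (pvRstrip_any_false p b hb) hd]
    exact pvStrip_rstrip b
  · have hu' : u.any p = false := pvBool_false hu
    rw [pvT_of_not_any p u hu', pvT_of_not_any p _ (pvStrip_any_false p u hu')]
    exact pvStrip_idem u

-- membership for a non-space character survives strip (both directions)
theorem pvMem_strip_iff (c : Char) (hc : PySem.Chars.isspace c = false) (u : List Char) :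
    (PySem.Chars.strip u).any (· == c) = u.any (· == c) := by
  by_cases hu : u.any (· == c) = true
  · obtain ⟨a, d, b, rfl, hd, hb⟩ := pvExists_last (· == c) u hu
    have hdc : d = c := by simpa using hd
    subst hdc
    rw [pvStrip_decomp a b d hc, hu]
    refine List.any_eq_true.mpr ⟨d, by simp, by simp⟩
  · have hu' : u.any (· == c) = false := pvBool_false hu
    rw [hu', pvStrip_any_false _ u hu']

-- the last element of a single-character split is pvT
theorem pvSplitGo_getLast (c : Char) (fuel : Nat) :
    ∀ l cur acc, l.length < fuel →
      ((PySem.Chars.splitOn.go [c] fuel l cur acc).getLastD []) =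
        if l.any (· == c) then pvT (· == c) l else cur.reverse ++ l := by
  induction fuel with
  | zero => intro l cur acc h; omega
  | succ fuel ih =>
    intro l cur acc h
    rcases l with _ | ⟨c', rest⟩
    · rw [PySem.Chars.splitOn.go]
      · simp [List.getLastD_eq_getLast?, List.getLast?_reverse]
      · omega
    · rw [PySem.Chars.splitOn.go.eq_def]
      simp only [List.isPrefixOf, List.length_cons] at *
      by_cases hc : c = c'
      · subst hc
        have hlt : rest.length < fuel := by omega
        simp only [beq_self_eq_true, Bool.true_and, if_pos, List.length_nil,
          List.drop_succ_cons, List.drop_zero]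
        rw [ih rest [] (cur.reverse :: acc) hlt]
        rw [pvT_cons]
        by_cases hr : rest.any (· == c) = true <;> simp [hr, List.any_cons]
      · have hne : ((c == c') && List.isPrefixOf [] rest) = false := by
          simp [Ne.symm, hc]
        rw [if_neg (by simp [hc])]
        have hlt : rest.length < fuel := by omega
        rw [ih rest (c' :: cur) acc hlt]
        rw [pvT_cons]
        have hcc : (c' == c) = false := by simp [Ne.symm hc]
        by_cases hr : rest.any (· == c) = true <;>
          simp [hr, List.any_cons, hcc]

theorem pvSplit_getLast (c : Char) (l : List Char) :
    ((PySem.Chars.splitOn l [c]).getLastD []) =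
      if l.any (· == c) then pvT (· == c) l else l := by
  have := pvSplitGo_getLast c (l.length + 1) l [] [] (by omega)
  simpa using this

-- Chars.isIn for a one-character needle is List.any
theorem pvIsIn_singleton (c : Char) (l : List Char) :
    PySem.Chars.isIn [c] l = l.any (· == c) := by
  by_cases h : l.any (· == c) = true
  · rw [h]
    refine (PySem.Chars.isIn_iff_infix _ _).mpr ?_
    refine (List.singleton_infix_iff c l).mpr ?_
    obtain ⟨x, hx, hxc⟩ := List.any_eq_true.mp h
    have : x = c := by simpa using hxc
    exact this ▸ hx
  · have h' : l.any (· == c) = false := pvBool_false h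
    rw [h']
    refine (PySem.Chars.isIn_eq_false_iff _ _).mpr ?_
    intro hinf
    have hm : c ∈ l := (List.singleton_infix_iff c l).mp hinf
    have := List.any_eq_false.mp h' c hm
    simp at this

-- one A-loop step, at the list level
def pvStepL (c : Char) (t : List Char) : List Char :=
  if PySem.Chars.isIn [c] t
  then PySem.Chars.strip ((PySem.Chars.splitOn t [c]).getLastD [])
  else t

-- the String-level fold step of port A computes pvStepL on the underlying list
theorem pvStep_toList (c : Char) (sep : String) (hsep : sep.toList = [c]) (t : String) :
    (if PySem.Str.isIn sep t
     then PySem.Str.strip (((PySem.Str.split? t sep).getD []).getLastD "")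
     else t).toList = pvStepL c t.toList := by
  have hIn : PySem.Str.isIn sep t = PySem.Chars.isIn [c] t.toList := by
    simp [PySem.Str.isIn, hsep]
  by_cases h : PySem.Chars.isIn [c] t.toList = true
  · have hsp : PySem.Str.split? t sep =
        some ((PySem.Chars.splitOn t.toList [c]).map String.ofList) := by
      rw [PySem.Str.split?.eq_1]
      rw [show PySem.Chars.split? t.toList sep.toList =
          some (PySem.Chars.splitOn t.toList [c]) by
        rw [PySem.Chars.split?.eq_1, hsep]; simp]
      simp
    rw [if_pos (by rw [hIn]; exact h), pvStepL, if_pos h]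
    rw [hsp]
    simp only [Option.getD_some]
    have hlast : ((PySem.Chars.splitOn t.toList [c]).map String.ofList).getLastD "" =
        String.ofList ((PySem.Chars.splitOn t.toList [c]).getLastD []) := by
      simp only [List.getLastD_eq_getLast?, List.getLast?_map]
      rcases (PySem.Chars.splitOn t.toList [c]).getLast? with _ | x <;> rfl
    rw [hlast]
    rw [PySem.Str.strip.eq_1]
    simp [String.toList_ofList]
  · rw [if_neg (by rw [hIn]; simpa using h), pvStepL, if_neg (by simpa using h)]

-- strip (pvStepL c t) only depends on strip t, and equals strip (pvT (·==c) ·)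
theorem pvStep_strip (c : Char) (hc : PySem.Chars.isspace c = false) (t t' : List Char)
    (h : PySem.Chars.strip t = PySem.Chars.strip t') :
    PySem.Chars.strip (pvStepL c t) = PySem.Chars.strip (pvT (· == c) t') := by
  have hp : ∀ x, (x == c) = true → PySem.Chars.isspace x = false := by
    intro x hx
    have : x = c := by simpa using hx
    exact this ▸ hc
  have hany : t.any (· == c) = t'.any (· == c) := by
    rw [← pvMem_strip_iff c hc t, ← pvMem_strip_iff c hc t', h]
  by_cases ha : t.any (· == c) = true
  · rw [pvStepL, if_pos (by rw [pvIsIn_singleton]; exact ha), pvSplit_getLast, if_pos ha]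
    rw [pvStrip_idem]
    rw [← pvST (· == c) hp t, h, pvST (· == c) hp t']
  · have ha' : t.any (· == c) = false := pvBool_false ha
    rw [pvStepL, if_neg (by rw [pvIsIn_singleton]; simp [ha'])]
    rw [pvT_of_not_any _ t' (by rw [← hany]; exact ha')]
    exact h

-- B's scan is takeWhile of the non-delimiter predicate
theorem pvScanB_eq_takeWhile (r : List Char) :
    pvScanB r = r.takeWhile (fun c => !(c == '|' || c == ';' || c == ',')) := by
  induction r with
  | nil => rfl
  | cons c r ih =>
    simp only [pvScanB, List.takeWhile_cons]
    cases h : (c == '|' || c == ';' || c == ',') <;> simp [ih]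

-- String-level step of A's fold, named so the final proof can speak about it
def pvStepS (t sep : String) : String :=
  if PySem.Str.isIn sep t
  then PySem.Str.strip (((PySem.Str.split? t sep).getD []).getLastD "")
  else t

theorem pvFold_eq (text : String) :
    ["|", ";", ","].foldl
      (fun t sep =>
        if PySem.Str.isIn sep t
        then PySem.Str.strip (((PySem.Str.split? t sep).getD []).getLastD "")
        else t) text = pvStepS (pvStepS (pvStepS text "|") ";") "," := by
  simp only [List.foldl_cons, List.foldl_nil, pvStepS]

theorem pvStepS_toList (c : Char) (sep : String) (hsep : sep.toList = [c]) (t : String) :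
    (pvStepS t sep).toList = pvStepL c t.toList :=
  pvStep_toList c sep hsep t

theorem pvMainChars (text : String) :
    PySem.Chars.strip ((pvStepS (pvStepS (pvStepS text "|") ";") ",").toList) =
      PySem.Chars.strip ((pvScanB text.toList.reverse).reverse) := by
  have ht1 : (pvStepS text "|").toList = pvStepL '|' text.toList :=
    pvStepS_toList '|' "|" (by decide) text
  have ht2 : (pvStepS (pvStepS text "|") ";").toList =
      pvStepL ';' (pvStepL '|' text.toList) := by
    rw [pvStepS_toList ';' ";" (by decide), ht1]
  have ht3 : (pvStepS (pvStepS (pvStepS text "|") ";") ",").toList =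
      pvStepL ',' (pvStepL ';' (pvStepL '|' text.toList)) := by
    rw [pvStepS_toList ',' "," (by decide), ht2]
  rw [ht3]
  have e1 : PySem.Chars.strip (pvStepL '|' text.toList) =
      PySem.Chars.strip (pvT (· == '|') text.toList) :=
    pvStep_strip '|' (by decide) _ _ rfl
  have e2 : PySem.Chars.strip (pvStepL ';' (pvStepL '|' text.toList)) =
      PySem.Chars.strip (pvT (· == ';') (pvT (· == '|') text.toList)) :=
    pvStep_strip ';' (by decide) _ _ e1
  have e3 : PySem.Chars.strip (pvStepL ',' (pvStepL ';' (pvStepL '|' text.toList))) =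
      PySem.Chars.strip (pvT (· == ',') (pvT (· == ';') (pvT (· == '|') text.toList))) :=
    pvStep_strip ',' (by decide) _ _ e2
  rw [e3, pvT_compose, pvT_compose, pvScanB_eq_takeWhile]
  have hpred : (fun c => c == ',' || c == ';' || c == '|') =
      (fun c : Char => c == '|' || c == ';' || c == ',') := by
    funext c
    cases h1 : (c == '|') <;> cases h2 : (c == ';') <;> cases h3 : (c == ',') <;>
      simp
  rw [hpred]
  rfl

-- ===== VERDICT (by name: the statement is the Claim_ definition above) =====
theorem pick_last_field_as_prompt_py_spec : Claim_equal_pick_last_field_as_prompt_py := by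
  intro text _
  unfold Spec_pick_last_field_as_prompt_py
  have h : PySem.Str.strip (pvStepS (pvStepS (pvStepS text "|") ";") ",") =
      PySem.Str.strip (String.ofList (pvScanB text.toList.reverse).reverse) := by
    rw [PySem.Str.strip.eq_1, PySem.Str.strip.eq_1]
    refine congrArg String.ofList ?_
    rw [String.toList_ofList]
    exact pvMainChars text
  simp only [pick_last_field_as_prompt_py, pick_last_field_as_prompt_py_alt, pvFold_eq, h]
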